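-- pv_equiv track=rewrite | github.com/etokrug/PythonProjects | Projects/websites/FindNewNews/FindNews/Grab/GCSUrlBuilder.py | google_url_escaping
-- ===== SOURCE A (Python) =====
-- def google_url_escaping(value):
--     returnValue = ""
--     for l in value:
--         if l in "$-_.+\'!*\"();/?:@=&|":
--             returnValue += ("%" + hex(ord(l))[2:])
--         else:
--             returnValue += l
--     returnValue.replace(" ", "+")
--     return returnValue
-- ===== SOURCE B (Python) =====
-- def google_url_escaping(value):
--     # Staged passes: one whole-string replace per special character.
--     # Correct because no escape string ('%' + hex digits) contains any special char,
--     # so later passes never touch text inserted by earlier ones.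
--     for c in "$-_.+\'!*\"();/?:@=&|":
--         value = value.replace(c, "%" + hex(ord(c))[2:])
--     return value
-- ===== Notes on version B (the rewrite author's own statement) =====
-- stated objective: alternative
-- what changed: Replaced A's single per-character if/else accumulation loop by 19 staged whole-string str.replace passes, one per special character (safe because no escape string contains a special character); A's dead no-op replace line is dropped.
import Mathlib
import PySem

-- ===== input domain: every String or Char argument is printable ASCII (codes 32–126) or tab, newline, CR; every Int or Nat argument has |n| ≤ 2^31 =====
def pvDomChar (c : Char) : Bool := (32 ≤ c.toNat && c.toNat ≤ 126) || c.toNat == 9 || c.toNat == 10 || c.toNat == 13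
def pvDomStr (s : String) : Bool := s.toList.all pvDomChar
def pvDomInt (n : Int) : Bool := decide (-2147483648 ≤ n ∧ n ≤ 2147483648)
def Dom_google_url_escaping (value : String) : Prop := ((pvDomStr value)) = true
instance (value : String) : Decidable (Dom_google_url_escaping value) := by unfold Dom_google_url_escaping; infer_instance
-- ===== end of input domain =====

-- B replaces A's single per-character if/else accumulation loop by 19 staged
-- whole-string replace passes, one per special character (objective: alternative);
-- correct because no escape string contains a special character.
-- The dead line in A that discards its own result (a no-op) is not ported.

-- ===== PORT A =====
-- the special characters, as in A's literal "$-_.+'!*\"();/?:@=&|"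
def pvSpecialsA : List Char := "$-_.+'!*\"();/?:@=&|".toList

-- "%" + hex(ord c)[2:], ported as '%' :: (("0x" ++ lowercase hex digits).drop 2); exact since ord c ≥ 0
def pvEsc (c : Char) : List Char := '%' :: (('0' :: 'x' :: Nat.toDigits 16 c.toNat).drop 2)

def google_url_escaping (value : String) : String :=
  String.mk (value.toList.foldl
    (fun returnValue l =>
      if PySem.Chars.isIn [l] pvSpecialsA then
        returnValue ++ pvEsc l
      else
        returnValue ++ [l]) [])

-- ===== PORT B =====
-- for c in specials: value = value.replace(c, "%" + hex(ord(c))[2:])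
def google_url_escaping_alt (value : String) : String :=
  String.mk (pvSpecialsA.foldl
    (fun s c => PySem.Chars.replace s [c] (pvEsc c)) value.toList)

-- ===== PRECONDITION & SPEC =====
def Spec_google_url_escaping (value : String) (out : String) : Prop := out = google_url_escaping_alt value
instance (value : String) (out : String) : Decidable (Spec_google_url_escaping value out) := by unfold Spec_google_url_escaping; infer_instance

-- ===== CLAIM (what is proved, stated in full; the proofs are below) =====
def Claim_equal_google_url_escaping : Prop := ∀ (value : String), Dom_google_url_escaping value → Spec_google_url_escaping value (google_url_escaping value)

-- ===== LEMMAS AND PROOFS =====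

-- the result of escaping with respect to a set of special characters cs
def pvG (cs : List Char) (x : Char) : List Char := if x ∈ cs then pvEsc x else [x]

-- single-char replace is per-character substitution
theorem pv_replace_go_single (c : Char) (new : List Char) :
    ∀ (l : List Char) (fuel : Nat) (acc : List Char), l.length ≤ fuel →
      PySem.Chars.replace.go [c] new fuel l acc
        = acc.reverse ++ l.flatMap (fun x => if x = c then new else [x]) := by
  intro l
  induction l with
  | nil =>
      intro fuel acc _
      cases fuel <;> simp [PySem.Chars.replace.go]
  | cons x t ih =>
      intro fuel acc hf
      cases fuel with
      | zero => simp at hf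
      | succ f =>
          by_cases hx : x = c
          · subst hx
            have hpre : List.isPrefixOf [x] (x :: t) = true := by
              simp [List.isPrefixOf]
            simp only [PySem.Chars.replace.go, hpre, if_pos, List.length_cons,
              List.length_nil, List.drop_succ_cons, List.drop_zero]
            rw [ih f (new.reverse ++ acc) (by simpa using Nat.le_of_succ_le_succ hf)]
            simp
          · have hpre : List.isPrefixOf [c] (x :: t) = false := by
              simp only [List.isPrefixOf, Bool.and_eq_false_iff, beq_eq_false_iff_ne]
              exact Or.inl (fun h => hx h.symm)
            simp only [PySem.Chars.replace.go, hpre]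
            rw [if_neg (by simp [hpre])]
            rw [ih f (x :: acc) (by simpa using Nat.le_of_succ_le_succ hf)]
            simp [hx]

theorem pv_replace_single (c : Char) (new : List Char) (l : List Char) :
    PySem.Chars.replace l [c] new = l.flatMap (fun x => if x = c then new else [x]) := by
  unfold PySem.Chars.replace
  rw [if_neg (by simp)]
  simpa using pv_replace_go_single c new l l.length [] (le_refl _)

-- flatMap by a function fixing every element of l is the identity
theorem pv_flatMap_fixed {f : Char → List Char} :
    ∀ (l : List Char), (∀ y ∈ l, f y = [y]) → l.flatMap f = l := by
  intro l
  induction l with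
  | nil => intro _; rfl
  | cons x t ih =>
      intro h
      simp [List.flatMap_cons, h x (by simp), ih (fun y hy => h y (by simp [hy]))]

-- staged replace passes compute the one-shot substitution, given that no
-- escape string contains a special character
theorem pv_fold_replace :
    ∀ (cs : List Char), (∀ a ∈ cs, ∀ b ∈ cs, a ∉ pvEsc b) →
      ∀ (xs : List Char),
        cs.foldl (fun s c => PySem.Chars.replace s [c] (pvEsc c)) xs
          = xs.flatMap (pvG cs) := by
  intro cs
  induction cs with
  | nil =>
      intro _ xs
      simp only [List.foldl_nil]
      exact (pv_flatMap_fixed xs (fun y _ => by simp [pvG])).symm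
  | cons c t ih =>
      intro h xs
      have ht : ∀ a ∈ t, ∀ b ∈ t, a ∉ pvEsc b :=
        fun a ha b hb => h a (by simp [ha]) b (by simp [hb])
      simp only [List.foldl_cons]
      rw [ih ht, pv_replace_single, List.flatMap_assoc]
      apply List.flatMap_congr
      intro x _
      by_cases hx : x = c
      · subst hx
        rw [if_pos rfl]
        have hfix : ∀ y ∈ pvEsc x, pvG t y = [y] := by
          intro y hy
          have : y ∉ t := fun hyt => h y (by simp [hyt]) x (by simp) hy
          simp [pvG, this]
        simp [pvG, pv_flatMap_fixed (pvEsc x) hfix]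
      · rw [if_neg hx]
        simp [pvG, List.mem_cons, hx]

-- the escape strings of the special characters, as literals
def pvEscLits : List (List Char) :=
  [['%', '2', '4'], ['%', '2', 'd'], ['%', '5', 'f'], ['%', '2', 'e'],
   ['%', '2', 'b'], ['%', '2', '7'], ['%', '2', '1'], ['%', '2', 'a'],
   ['%', '2', '2'], ['%', '2', '8'], ['%', '2', '9'], ['%', '3', 'b'],
   ['%', '2', 'f'], ['%', '3', 'f'], ['%', '3', 'a'], ['%', '4', '0'],
   ['%', '3', 'd'], ['%', '2', '6'], ['%', '7', 'c']]

theorem pv_esc_map : pvSpecialsA.map pvEsc = pvEscLits := by decide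

-- no escape string contains a special character (so passes do not interfere)
theorem pv_disj : ∀ a ∈ pvSpecialsA, ∀ b ∈ pvSpecialsA, a ∉ pvEsc b := by
  intro a ha b hb
  have hmem : pvEsc b ∈ pvSpecialsA.map pvEsc := List.mem_map_of_mem hb
  rw [pv_esc_map] at hmem
  have hball : pvSpecialsA.all (fun x => pvEscLits.all (fun e => !(e.contains x))) = true := by
    rfl
  have h1 := List.all_eq_true.mp hball a ha
  have h2 := List.all_eq_true.mp h1 (pvEsc b) hmem
  simpa using h2

-- A's per-character branch equals substitution with respect to the full special list
theorem pv_point (l : Char) :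
    (if PySem.Chars.isIn [l] pvSpecialsA then pvEsc l else [l]) = pvG pvSpecialsA l := by
  unfold pvG
  by_cases h : l ∈ pvSpecialsA
  · rw [if_pos h,
      if_pos ((PySem.Chars.isIn_iff_infix [l] pvSpecialsA).mpr
        ((List.singleton_infix_iff l pvSpecialsA).mpr h))]
  · rw [if_neg h,
      if_neg (by
        simp [(PySem.Chars.isIn_eq_false_iff [l] pvSpecialsA).mpr
          (fun hinf => h ((List.singleton_infix_iff l pvSpecialsA).mp hinf))])]

-- ===== VERDICT (by name: the statement is the Claim_ definition above) =====
theorem google_url_escaping_spec : Claim_equal_google_url_escaping := by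
  intro value _
  unfold Spec_google_url_escaping google_url_escaping google_url_escaping_alt
  rw [pv_fold_replace pvSpecialsA pv_disj value.toList]
  have hbody :
      (fun (returnValue : List Char) (l : Char) =>
        if PySem.Chars.isIn [l] pvSpecialsA then returnValue ++ pvEsc l
        else returnValue ++ [l])
      = (fun acc l => acc ++ pvG pvSpecialsA l) := by
    funext acc l
    rw [← pv_point l]
    split <;> rfl
  rw [hbody, PySem.List.foldl_append_eq_flatMap, List.nil_append]
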